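-- pv_equiv track=rewrite | github.com/Rikaisan/euler-py | 044/044.py | generate_pentagonals
-- ===== SOURCE A (Python) =====
-- def generate_pentagonals(limit):
--     pentagonal_list = []
--     counter = 1
--     number = 0
--     while number < limit:
--         temp = counter * (3 * counter - 1) // 2
--         number = temp
--         pentagonal_list.append(number)
--         counter += 1
--     return pentagonal_list
-- ===== SOURCE B (Python) =====
-- def generate_pentagonals(limit):
--     # Stage 1: how many pentagonals to emit (first one reaching/exceeding limit included),
--     # counted via the additive gap 3k-2 without building the list.
--     k = 0
--     p = 0
--     while p < limit:
--         k += 1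
--         p += 3 * k - 2
--     # Stage 2: build the list in one comprehension from the closed form.
--     return [i * (3 * i - 1) // 2 for i in range(1, k + 1)]
-- ===== Notes on version B (the rewrite author's own statement) =====
-- stated objective: alternative
-- what changed: B is staged: a first loop only counts how many pentagonals are needed using the additive gap 3k-2, then a single comprehension over range(1,k+1) builds the list from the closed form; A interleaves computing and appending in one while loop.
import Mathlib
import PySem

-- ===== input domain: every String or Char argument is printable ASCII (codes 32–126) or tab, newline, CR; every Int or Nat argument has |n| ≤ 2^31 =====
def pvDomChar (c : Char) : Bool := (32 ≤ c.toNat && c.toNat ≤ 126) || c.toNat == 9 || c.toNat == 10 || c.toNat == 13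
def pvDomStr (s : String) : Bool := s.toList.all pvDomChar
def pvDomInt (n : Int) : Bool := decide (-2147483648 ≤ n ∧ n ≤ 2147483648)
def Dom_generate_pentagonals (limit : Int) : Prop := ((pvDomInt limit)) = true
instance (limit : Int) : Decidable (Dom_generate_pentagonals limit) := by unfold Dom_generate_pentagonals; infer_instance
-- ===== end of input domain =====

-- B is staged (count first with the additive gap 3k-2, then build the list by one map over a
-- range) instead of A's single append loop; objective: alternative decomposition, same cost.
-- Each while loop is ported with a fuel counter (limit.toNat + 2) that only guards totality:
-- the loop exits once the running value reaches limit, which happens within the fuel.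

-- ===== PORT A =====
-- A's while loop: state (counter, number); each iteration appends temp, rendered as
-- 'temp :: rest of the loop' (the same list, built front-first)
def pentLoopA (fuel : Nat) (limit : Int) (counter : Int) (number : Int) : List Int :=
  match fuel with
  | 0 => []
  | f + 1 =>
    if number < limit then
      let temp := PySem.Int.floordiv (counter * (3 * counter - 1)) 2
      temp :: pentLoopA f limit (counter + 1) temp
    else []

def generate_pentagonals (limit : Int) : List Int :=
  pentLoopA (limit.toNat + 2) limit 1 0

-- ===== PORT B =====
-- stage 1 of B: the counting while loop, state (k, p)
def pentCount (fuel : Nat) (limit : Int) (k : Int) (p : Int) : Int :=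
  match fuel with
  | 0 => k
  | f + 1 =>
    if p < limit then pentCount f limit (k + 1) (p + (3 * (k + 1) - 2))
    else k

-- stage 2 of B: the comprehension over range(1, k + 1)
def generate_pentagonals_alt (limit : Int) : List Int :=
  let k := pentCount (limit.toNat + 2) limit 0 0
  (PySem.List.pyRange 1 (k + 1) 1).map (fun i => PySem.Int.floordiv (i * (3 * i - 1)) 2)

-- ===== PRECONDITION & SPEC =====
def Spec_generate_pentagonals (limit : Int) (out : List Int) : Prop := out = generate_pentagonals_alt limit
instance (limit : Int) (out : List Int) : Decidable (Spec_generate_pentagonals limit out) := by unfold Spec_generate_pentagonals; infer_instance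

-- ===== CLAIM (what is proved, stated in full; the proofs are below) =====
def Claim_equal_generate_pentagonals : Prop := ∀ (limit : Int), Dom_generate_pentagonals limit → Spec_generate_pentagonals limit (generate_pentagonals limit)

-- ===== LEMMAS AND PROOFS =====

-- the pentagonal closed form, as both ports compute it
def pentOf (c : Int) : Int := PySem.Int.floordiv (c * (3 * c - 1)) 2

lemma two_mul_pentOf (c : Int) : 2 * pentOf c = c * (3 * c - 1) := by
  have hdvd : (2 : Int) ∣ c * (3 * c - 1) := by
    rcases Int.even_or_odd c with ⟨k, hk⟩ | ⟨k, hk⟩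
    · exact ⟨k * (3 * c - 1), by rw [hk]; ring⟩
    · exact ⟨c * (3 * k + 1), by rw [hk]; ring⟩
  obtain ⟨m, hm⟩ := hdvd
  have : pentOf c = m := by
    unfold pentOf
    rw [PySem.Int.floordiv_eq_iff_of_pos (by omega)]
    omega
  omega

lemma pentOf_succ (c : Int) : pentOf c = pentOf (c - 1) + (3 * c - 2) := by
  have h1 := two_mul_pentOf c
  have h2 := two_mul_pentOf (c - 1)
  have h3 : c * (3 * c - 1) = (c - 1) * (3 * (c - 1) - 1) + (6 * c - 4) := by ring
  omega

-- the counting loop never decreases its counter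
lemma pentCount_ge (limit : Int) : ∀ (fuel : Nat) (k p : Int), k ≤ pentCount fuel limit k p := by
  intro fuel
  induction fuel with
  | zero => intro k p; simp [pentCount]
  | succ f ih =>
    intro k p
    rw [pentCount]
    split
    · exact le_trans (by omega) (ih (k + 1) _)
    · exact le_refl k

-- lockstep: A's loop started at counter c with number = P(c-1) emits exactly the closed
-- forms of c, c+1, …, K where K is what B's counting loop (same fuel, same test values)
-- returns from state (c-1, P(c-1))
lemma loopA_eq_map (limit : Int) : ∀ (fuel : Nat) (c : Int),
    pentLoopA fuel limit c (pentOf (c - 1)) =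
      (PySem.List.pyRange c (pentCount fuel limit (c - 1) (pentOf (c - 1)) + 1) 1).map
        (fun i => PySem.Int.floordiv (i * (3 * i - 1)) 2) := by
  intro fuel
  induction fuel with
  | zero =>
    intro c
    simp [pentLoopA, pentCount]
  | succ f ih =>
    intro c
    rw [pentLoopA, pentCount]
    by_cases hlt : pentOf (c - 1) < limit
    · rw [if_pos hlt, if_pos hlt]
      have hstep : pentOf (c - 1) + (3 * c - 2) = pentOf c := by
        have := pentOf_succ c; omega
      have hK : c ≤ pentCount f limit c (pentOf c) := pentCount_ge limit f c _
      have hcons := PySem.List.pyRange_one_cons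
        (a := c) (b := pentCount f limit c (pentOf c) + 1) (by omega)
      have hrec := ih (c + 1)
      have h3 : c + 1 - 1 = c := by ring
      rw [h3] at hrec
      have h4 : c - 1 + 1 = c := by ring
      rw [h4, hstep, hcons, List.map_cons]
      exact congrArg (pentOf c :: ·) hrec
    · rw [if_neg hlt, if_neg hlt]
      simp

-- ===== VERDICT (by name: the statement is the Claim_ definition above) =====
theorem generate_pentagonals_spec : Claim_equal_generate_pentagonals := by
  intro limit _
  unfold Spec_generate_pentagonals generate_pentagonals generate_pentagonals_alt
  have h := loopA_eq_map limit (limit.toNat + 2) 1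
  have h0 : pentOf (1 - 1) = 0 := by norm_num [pentOf, PySem.Int.floordiv]
  rw [h0] at h
  simpa using h
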